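-- pv_equiv track=rewrite | github.com/Kukukaya/Elab-Kasetsart | Elab-105/E02.py | find_sum_and_num_factors
-- ===== SOURCE A (Python) =====
-- def list_factors(n):
--     fac_str = ''
--     for i in range(1,n+1):
--         if n%i == 0:
--             strNum = str(i)
--             fac_str += strNum + ' '
--     return fac_str
--
-- def find_sum_and_num_factors(n):
--     str_num = list_factors(n)
--     sumFac = 0
--     for i in str_num:
--         if i == ' ':
--             continue
--         else:
--             intNum = int(i)
--             sumFac += intNum
--     return sumFac
-- ===== SOURCE B (Python) =====
-- def find_sum_and_num_factors(n):
--     def digsum(d):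
--         return sum(int(c) for c in str(d))
--     total = 0
--     i = 1
--     while i * i <= n:
--         if n % i == 0:
--             total += digsum(i)
--             q = n // i
--             if q != i:
--                 total += digsum(q)
--         i += 1
--     return total
-- ===== Notes on version B (the rewrite author's own statement) =====
-- stated objective: faster
-- what changed: B enumerates divisors in complementary pairs by trial division up to sqrt(n) and sums their digit sums directly, instead of scanning every i in 1..n and round-tripping all divisors through one space-separated string that is then re-parsed character by character.
import Mathlib
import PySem

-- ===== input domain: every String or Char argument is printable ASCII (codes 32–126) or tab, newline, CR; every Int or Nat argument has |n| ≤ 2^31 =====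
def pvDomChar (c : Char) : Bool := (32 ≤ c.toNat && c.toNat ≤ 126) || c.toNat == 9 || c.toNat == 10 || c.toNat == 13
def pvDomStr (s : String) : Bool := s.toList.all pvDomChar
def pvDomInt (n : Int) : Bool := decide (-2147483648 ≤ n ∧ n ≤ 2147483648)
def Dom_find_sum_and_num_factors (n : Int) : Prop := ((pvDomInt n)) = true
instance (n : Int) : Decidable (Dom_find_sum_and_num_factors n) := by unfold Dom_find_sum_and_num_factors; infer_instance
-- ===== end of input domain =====

-- B replaces A's full 1..n scan (which builds and re-parses a space-separated divisor string)
-- by trial division up to √n over divisor pairs, summing digit sums directly: asymptotically faster.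


-- ===== PORT A =====
-- int(c) for a single character c; in A it is only reached on digit characters, where
-- PySem.Int.ofChars? is some; the .getD 0 default is never taken there.
def pvCharInt (c : Char) : Int := (PySem.Int.ofChars? [c]).getD 0

-- Python str modelled on its char list (per PYSEM guidance); String.ofList packs the result.
def list_factors (n : Int) : String :=
  String.ofList <|
    (PySem.List.pyRange 1 (n + 1) 1).foldl
      (fun fac_str i =>
        if PySem.Int.mod n i = 0 then fac_str ++ (PySem.Int.toChars i ++ [' ']) else fac_str)
      []

def find_sum_and_num_factors (n : Int) : Int :=
  let str_num := list_factors n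
  str_num.toList.foldl
    (fun sumFac c => if c = ' ' then sumFac else sumFac + pvCharInt c) 0

-- ===== PORT B =====
-- digsum(d) = sum(int(c) for c in str(d))
def pvDigsum (d : Int) : Int :=
  (PySem.Int.toChars d).foldl (fun acc c => acc + pvCharInt c) 0

-- the `while i * i <= n` loop of Source B (i starts at 1 and only increases, so i : Nat)
def pvFsLoop (n : Int) (i : Nat) (total : Int) : Int :=
  if h : (i : Int) * i ≤ n then
    pvFsLoop n (i + 1)
      (if PySem.Int.mod n i = 0 then
        total + pvDigsum i +
          (if PySem.Int.floordiv n i ≠ (i : Int) then pvDigsum (PySem.Int.floordiv n i) else 0)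
      else total)
  else total
termination_by (n.toNat + 1) - i
decreasing_by
  have hi : (i : Int) ≤ n := by
    rcases Nat.eq_zero_or_pos i with h0 | h0
    · subst h0; simpa using h
    · have h1 : (1 : Int) ≤ (i : Int) := by exact_mod_cast h0
      nlinarith
  omega

def find_sum_and_num_factors_alt (n : Int) : Int := pvFsLoop n 1 0

-- ===== PRECONDITION & SPEC =====
def Spec_find_sum_and_num_factors (n : Int) (out : Int) : Prop := out = find_sum_and_num_factors_alt n
instance (n : Int) (out : Int) : Decidable (Spec_find_sum_and_num_factors n out) := by unfold Spec_find_sum_and_num_factors; infer_instance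

-- ===== CLAIM (what is proved, stated in full; the proofs are below) =====
def Claim_equal_find_sum_and_num_factors : Prop := ∀ (n : Int), Dom_find_sum_and_num_factors n → Spec_find_sum_and_num_factors n (find_sum_and_num_factors n)

-- ===== LEMMAS AND PROOFS =====

theorem sum_map_flatMap (l : List Int) (g : Int → List Char) (f : Char → Int) :
    ((l.flatMap g).map f).sum = (l.map (fun x => ((g x).map f).sum)).sum := by
  rw [List.flatMap_def, List.map_flatten, List.sum_flatten, List.map_map, List.map_map]; rfl

-- A's result is the digit-sum, summed over the divisors 1 ≤ d ≤ n.
theorem A_char (n : Int) :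
    find_sum_and_num_factors n =
      ∑ d ∈ (Finset.Ico (1 : ℤ) (n + 1)).filter (fun d => d ∣ n), pvDigsum d := by
  have hsp : pvCharInt ' ' = 0 := by decide
  have hfun : (fun (s : Int) (c : Char) => if c = ' ' then s else s + pvCharInt c)
      = (fun s c => s + pvCharInt c) := by
    funext s c
    by_cases hc : c = ' '
    · simp [hc, hsp]
    · simp [hc]
  unfold find_sum_and_num_factors list_factors
  rw [PySem.List.foldl_ite_eq_foldl_filter, PySem.List.foldl_append_eq_flatMap]
  simp only [String.toList_ofList, List.nil_append, hfun]
  rw [PySem.List.foldl_add, zero_add, sum_map_flatMap]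
  have hmap : ∀ x : Int, (((PySem.Int.toChars x) ++ [' ']).map pvCharInt).sum = pvDigsum x := by
    intro x
    rw [List.map_append, List.sum_append, pvDigsum, PySem.List.foldl_add, zero_add]
    simp [hsp]
  simp only [hmap]
  rw [← List.sum_toFinset _ (((PySem.List.nodup_pyRange_one 1 (n + 1))).filter _)]
  congr 1
  rw [List.toFinset_filter]
  have h1 : (PySem.List.pyRange 1 (n + 1) 1).toFinset = Finset.Ico (1 : ℤ) (n + 1) := by
    ext x
    simp [PySem.List.mem_pyRange_one, Finset.mem_Ico]
  rw [h1]
  apply Finset.filter_congr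
  intro x hx
  simp [PySem.Int.mod_eq_zero_iff_dvd]

-- B's loop, characterised as a sum over the small divisors d ≥ i.
theorem fsLoop_char (n : Int) (i : Nat) (total : Int) (hi : 1 ≤ i) :
    pvFsLoop n i total =
      total + ∑ d ∈ (Finset.Ico (i : ℤ) (n + 1)).filter (fun d => d ∣ n ∧ d * d ≤ n),
        (pvDigsum d + if n / d ≠ d then pvDigsum (n / d) else 0) := by
  induction i, total using pvFsLoop.induct n with
  | case1 i total h ih =>
    rw [pvFsLoop, dif_pos h]
    have hi1 : (1 : Int) ≤ (i : Int) := by exact_mod_cast hi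
    have hin : (i : Int) ≤ n := by nlinarith
    have hsplit : Finset.Ico (i : ℤ) (n + 1) = insert (i : ℤ) (Finset.Ico ((i : ℤ) + 1) (n + 1)) :=
      (Finset.insert_Ico_add_one_left_eq_Ico (by omega)).symm
    have hnotmem : (i : ℤ) ∉ (Finset.Ico ((i : ℤ) + 1) (n + 1)).filter
        (fun d => d ∣ n ∧ d * d ≤ n) := by
      simp [Finset.mem_Ico]
    have hpos : (0 : Int) < (i : Int) := by omega
    simp only [dite_eq_ite] at ih
    rw [ih (by omega), hsplit, Finset.filter_insert]
    have hcast : ((i : ℤ) + 1) = ((i + 1 : Nat) : ℤ) := by push_cast; ring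
    by_cases hdvd : (i : ℤ) ∣ n
    · have hmod : PySem.Int.mod n (i : ℤ) = 0 := (PySem.Int.mod_eq_zero_iff_dvd n (i : ℤ)).mpr hdvd
      have hc : (i : ℤ) ∣ n ∧ (i : ℤ) * i ≤ n := ⟨hdvd, h⟩
      rw [if_pos hmod, if_pos hc, Finset.sum_insert hnotmem,
        PySem.Int.floordiv_eq_ediv_of_pos hpos, hcast]
      ring
    · have hmod : ¬ PySem.Int.mod n (i : ℤ) = 0 := by
        rw [PySem.Int.mod_eq_zero_iff_dvd]; exact hdvd
      have hc : ¬ ((i : ℤ) ∣ n ∧ (i : ℤ) * i ≤ n) := fun hcc => hdvd hcc.1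
      rw [if_neg hmod, if_neg hc, hcast]
  | case2 i total h =>
    rw [pvFsLoop, dif_neg h]
    have hempty : (Finset.Ico (i : ℤ) (n + 1)).filter (fun d => d ∣ n ∧ d * d ≤ n) = ∅ := by
      rw [Finset.filter_eq_empty_iff]
      intro d hd
      simp only [Finset.mem_Ico] at hd
      rintro ⟨-, hle⟩
      have hi1 : (1 : Int) ≤ (i : Int) := by exact_mod_cast hi
      have : (i : ℤ) * i ≤ d * d := by nlinarith [hd.1]
      exact h (by linarith)
    rw [hempty]
    simp

theorem div_facts (n d : ℤ) (hn : 1 ≤ n) (hd : 1 ≤ d) (hdvd : d ∣ n) :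
    (n / d) * d = n ∧ 1 ≤ n / d ∧ n / d ≤ n ∧ n / d ∣ n ∧ n / (n / d) = d := by
  have h1 : (n / d) * d = n := Int.ediv_mul_cancel hdvd
  have hq1 : 1 ≤ n / d := by nlinarith [h1]
  have hq0 : n / d ≠ 0 := by omega
  refine ⟨h1, hq1, by nlinarith, ⟨d, h1.symm⟩, ?_⟩
  calc n / (n / d) = ((n / d) * d) / (n / d) := by rw [h1]
    _ = d := Int.mul_ediv_cancel_left d hq0

-- divisor pairing: summing f over all divisors of n equals summing f d (+ f (n/d) when d ≠ n/d)
-- over the divisors d with d² ≤ n.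
theorem pair_sum (f : ℤ → ℤ) (n : ℤ) :
    ∑ d ∈ (Finset.Ico (1 : ℤ) (n + 1)).filter (fun d => d ∣ n), f d
      = ∑ d ∈ (Finset.Ico (1 : ℤ) (n + 1)).filter (fun d => d ∣ n ∧ d * d ≤ n),
          (f d + if n / d ≠ d then f (n / d) else 0) := by
  rcases le_or_gt n 0 with hn | hn
  · rw [Finset.Ico_eq_empty (by omega)]; simp
  have hn1 : 1 ≤ n := hn
  rw [Finset.sum_add_distrib]
  have hite : ∑ d ∈ (Finset.Ico (1 : ℤ) (n + 1)).filter (fun d => d ∣ n ∧ d * d ≤ n),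
      (if n / d ≠ d then f (n / d) else 0)
      = ∑ d ∈ (Finset.Ico (1 : ℤ) (n + 1)).filter (fun d => d ∣ n ∧ d * d < n), f (n / d) := by
    rw [← Finset.sum_filter, Finset.filter_filter]
    apply Finset.sum_congr _ (fun _ _ => rfl)
    apply Finset.filter_congr
    intro d hd
    simp only [Finset.mem_Ico] at hd
    obtain ⟨hd1, _⟩ := hd
    constructor
    · rintro ⟨⟨hdvd, hle⟩, hne⟩
      refine ⟨hdvd, lt_of_le_of_ne hle ?_⟩
      intro heq
      obtain ⟨h1, -, -, -, -⟩ := div_facts n d hn1 hd1 hdvd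
      exact hne (by nlinarith)
    · rintro ⟨hdvd, hlt⟩
      obtain ⟨h1, -, -, -, -⟩ := div_facts n d hn1 hd1 hdvd
      refine ⟨⟨hdvd, le_of_lt hlt⟩, fun heq => ?_⟩
      rw [heq] at h1; nlinarith
  rw [hite]
  have hbij : ∑ d ∈ (Finset.Ico (1 : ℤ) (n + 1)).filter (fun d => d ∣ n ∧ d * d < n), f (n / d)
      = ∑ d ∈ (Finset.Ico (1 : ℤ) (n + 1)).filter (fun d => d ∣ n ∧ n < d * d), f d := by
    apply Finset.sum_nbij' (i := fun d => n / d) (j := fun e => n / e)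
    · intro d hd
      simp only [Finset.mem_filter, Finset.mem_Ico] at hd ⊢
      obtain ⟨⟨hd1, -⟩, hdvd, hlt⟩ := hd
      obtain ⟨h1, hq1, hqn, hqdvd, -⟩ := div_facts n d hn1 hd1 hdvd
      have hdq : d < n / d := by nlinarith
      exact ⟨⟨hq1, by omega⟩, hqdvd, by nlinarith⟩
    · intro e he
      simp only [Finset.mem_filter, Finset.mem_Ico] at he ⊢
      obtain ⟨⟨he1, -⟩, hdvd, hgt⟩ := he
      obtain ⟨h1, hq1, hqn, hqdvd, -⟩ := div_facts n e hn1 he1 hdvd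
      have hre : n / e < e := by nlinarith
      exact ⟨⟨hq1, by omega⟩, hqdvd, by nlinarith⟩
    · intro d hd
      simp only [Finset.mem_filter, Finset.mem_Ico] at hd
      exact (div_facts n d hn1 hd.1.1 hd.2.1).2.2.2.2
    · intro e he
      simp only [Finset.mem_filter, Finset.mem_Ico] at he
      exact (div_facts n e hn1 he.1.1 he.2.1).2.2.2.2
    · intro d hd; rfl
  rw [hbij]
  rw [← Finset.sum_filter_add_sum_filter_not ((Finset.Ico (1 : ℤ) (n + 1)).filter (fun d => d ∣ n))
      (fun d => d * d ≤ n) f, Finset.filter_filter, Finset.filter_filter]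
  congr 1
  apply Finset.sum_congr _ (fun _ _ => rfl)
  apply Finset.filter_congr
  intro d _
  simp [not_le]

-- ===== VERDICT (by name: the statement is the Claim_ definition above) =====
theorem find_sum_and_num_factors_spec : Claim_equal_find_sum_and_num_factors := by
  intro n _
  show _ = _
  rw [A_char, pair_sum pvDigsum n, find_sum_and_num_factors_alt,
    fsLoop_char n 1 0 le_rfl, zero_add]
  norm_num
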